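-- pv_equiv track=rewrite | github.com/pypi-data/pypi-mirror-324 | packages/speechmatching/speechmatching-1.0.0.tar.gz/speechmatching-1.0.0/speechmatching/recording.py | sanitize_raw_transcript
-- ===== SOURCE A (Python) =====
-- def sanitize_raw_transcript(
--     transcript: str,
--     no_dup: bool = True,
--     no_space: bool = True
-- ) -> str:
--     """Sanitize a raw transcript by removing certain characters.
--
--     The character ``|`` is treated as a special character and will be transformed
--     into a space if ``no_space`` is set to ``False``. Optionally, duplicate
--     characters can be deleted, which is set to ``True`` by default.
--
--     Examples:
--         >>> sanitize_raw_transcript("he||llo||world!")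
--         'heloworld'
--         >>> sanitize_raw_transcript("he||llo||world!", no_space=False)
--         'he lo world'
--
--     Args:
--         transcript: The raw transcript.
--         no_dup: Whether to remove duplicate characters or not. Default value
--             is ``True``.
--         no_space: Whether to remove spaces or not. Default value is ``True``.
--
--     Returns:
--         The final sanitized string.
--     """
--     result = ''
--     for c in transcript:
--         new_char = None
--         if c == '|':
--             if not no_space:
--                 new_char = ' '
--         elif c.isalnum():
--             new_char = c
--         else:
--             continue
--         if new_char is None:
--             continue
--         if no_dup and len(result) > 0 and result[-1] == new_char:
--             continue
--         result += new_char
--     return result.strip()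
-- ===== SOURCE B (Python) =====
-- def sanitize_raw_transcript(transcript, no_dup=True, no_space=True):
--     # pass 1: map each character to its replacement (or drop it)
--     chars = []
--     for c in transcript:
--         if c == '|':
--             if not no_space:
--                 chars.append(' ')
--         elif c.isalnum():
--             chars.append(c)
--     # pass 2: collapse runs of equal characters by comparing neighbours
--     if no_dup:
--         chars = chars[:1] + [b for a, b in zip(chars, chars[1:]) if a != b]
--     return ''.join(chars).strip()
-- ===== Notes on version B (the rewrite author's own statement) =====
-- stated objective: simpler
-- what changed: A's single loop with maintained last-result-character state is replaced by two separate passes: a filter/map pass building the kept characters, then a neighbour-comparison (zip with the tail) pass collapsing runs when no_dup, then strip.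
import Mathlib
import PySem

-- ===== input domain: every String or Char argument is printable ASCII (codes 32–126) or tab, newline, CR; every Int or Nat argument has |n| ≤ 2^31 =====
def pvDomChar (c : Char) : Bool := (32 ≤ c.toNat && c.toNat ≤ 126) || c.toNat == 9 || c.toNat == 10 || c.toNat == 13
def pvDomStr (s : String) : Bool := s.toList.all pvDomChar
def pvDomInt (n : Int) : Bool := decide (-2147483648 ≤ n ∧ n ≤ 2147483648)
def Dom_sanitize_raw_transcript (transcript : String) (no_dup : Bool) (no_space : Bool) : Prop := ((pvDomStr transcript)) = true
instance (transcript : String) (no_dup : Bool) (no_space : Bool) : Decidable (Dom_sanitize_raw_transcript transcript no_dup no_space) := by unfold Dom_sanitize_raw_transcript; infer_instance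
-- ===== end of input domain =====

-- B replaces A's single loop with maintained last-character state by two separate passes
-- (filter/map, then neighbour-comparison dedup); objective: simpler decomposition, same cost.

-- ===== PORT A =====
-- loop body of A's single for-loop (maintains the growing `result`, consults result[-1])
def pvAStep (no_dup : Bool) (no_space : Bool) (result : List Char) (c : Char) : List Char :=
  let new_char : Option Char :=
    if c = '|' then (if !no_space then some ' ' else none)
    else if PySem.Chars.isalnum c then some c
    else none
  match new_char with
  | none => result
  | some nc =>
    if no_dup && decide (0 < result.length) && (PySem.List.pyGet? result (-1) == some nc)
    then result
    else result ++ [nc]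

def sanitize_raw_transcript (transcript : String) (no_dup : Bool) (no_space : Bool) : String :=
  let result := transcript.toList.foldl (pvAStep no_dup no_space) []
  PySem.Str.strip (String.mk result)

-- ===== PORT B =====
-- pass 1 loop body: append the character's replacement (or nothing)
def pvBStep (no_space : Bool) (chars : List Char) (c : Char) : List Char :=
  if c = '|' then (if !no_space then chars ++ [' '] else chars)
  else if PySem.Chars.isalnum c then chars ++ [c] else chars

def sanitize_raw_transcript_alt (transcript : String) (no_dup : Bool) (no_space : Bool) : String :=
  let chars := transcript.toList.foldl (pvBStep no_space) []
  -- pass 2: chars[:1] + [b for a, b in zip(chars, chars[1:]) if a != b]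
  let chars := if no_dup then
      chars.take 1 ++ (((chars.zip (chars.drop 1)).filter (fun p => p.1 != p.2)).map Prod.snd)
    else chars
  PySem.Str.strip (String.mk chars)

-- ===== PRECONDITION & SPEC =====
def Spec_sanitize_raw_transcript (transcript : String) (no_dup : Bool) (no_space : Bool) (out : String) : Prop := out = sanitize_raw_transcript_alt transcript no_dup no_space
instance (transcript : String) (no_dup : Bool) (no_space : Bool) (out : String) : Decidable (Spec_sanitize_raw_transcript transcript no_dup no_space out) := by unfold Spec_sanitize_raw_transcript; infer_instance

-- ===== CLAIM (what is proved, stated in full; the proofs are below) =====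
def Claim_equal_sanitize_raw_transcript : Prop := ∀ (transcript : String) (no_dup : Bool) (no_space : Bool), Dom_sanitize_raw_transcript transcript no_dup no_space → Spec_sanitize_raw_transcript transcript no_dup no_space (sanitize_raw_transcript transcript no_dup no_space)

-- ===== LEMMAS AND PROOFS =====

-- the per-character replacement both loops implement
def pvF (no_space : Bool) (c : Char) : Option Char :=
  if c = '|' then (if !no_space then some ' ' else none)
  else if PySem.Chars.isalnum c then some c else none

-- run-collapse, threaded with the previous kept character (mirrors A's dedup state)
def pvG (last? : Option Char) : List Char → List Char
  | [] => []
  | c :: t => if some c = last? then pvG last? t else c :: pvG (some c) t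

-- run-collapse, structural
def pvCollapse : List Char → List Char
  | [] => []
  | [a] => [a]
  | a :: b :: t => if a = b then pvCollapse (b :: t) else a :: pvCollapse (b :: t)

theorem pyGet?_neg_one (xs : List Char) : PySem.List.pyGet? xs (-1) = xs.getLast? := by
  cases xs with
  | nil => rfl
  | cons a t =>
    simp [PySem.List.pyGet?, PySem.List.pyIdx?, List.getLast?_eq_getElem?]

theorem pvBStep_eq (no_space : Bool) (acc : List Char) (c : Char) :
    pvBStep no_space acc c = acc ++ (pvF no_space c).toList := by
  unfold pvBStep pvF
  by_cases h : c = '|' <;> cases no_space <;> simp [h] <;> split <;> simp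

theorem B_filter (no_space : Bool) : ∀ (l acc : List Char),
    l.foldl (pvBStep no_space) acc = acc ++ l.filterMap (pvF no_space) := by
  intro l
  induction l with
  | nil => simp
  | cons c t ih =>
    intro acc
    simp only [List.foldl_cons, ih, pvBStep_eq]
    cases hc : pvF no_space c <;> simp [List.filterMap_cons, hc]

theorem A_false (no_space : Bool) : ∀ (l acc : List Char),
    l.foldl (pvAStep false no_space) acc = acc ++ l.filterMap (pvF no_space) := by
  intro l
  induction l with
  | nil => simp
  | cons c t ih =>
    intro acc
    simp only [List.foldl_cons]
    have hstep : pvAStep false no_space acc c = acc ++ (pvF no_space c).toList := by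
      unfold pvAStep pvF
      cases h : (if c = '|' then (if !no_space then some ' ' else none)
                 else if PySem.Chars.isalnum c then some c else none) <;> simp [h]
    rw [hstep, ih]
    cases hc : pvF no_space c <;> simp [List.filterMap_cons, hc]

theorem A_true (no_space : Bool) : ∀ (l acc : List Char),
    l.foldl (pvAStep true no_space) acc = acc ++ pvG acc.getLast? (l.filterMap (pvF no_space)) := by
  intro l
  induction l with
  | nil => intro acc; simp [pvG]
  | cons c t ih =>
    intro acc
    simp only [List.foldl_cons]
    have hbody : pvAStep true no_space acc c =
        match pvF no_space c with
        | none => acc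
        | some nc =>
          if true && decide (0 < acc.length) && (PySem.List.pyGet? acc (-1) == some nc)
          then acc else acc ++ [nc] := by
      unfold pvAStep pvF; rfl
    cases hc : pvF no_space c with
    | none =>
      rw [hbody]; simp only [hc, List.filterMap_cons, ih]
    | some nc =>
      rw [hbody]
      simp only [hc, List.filterMap_cons]
      by_cases hdup : acc.getLast? = some nc
      · cases acc with
        | nil => simp at hdup
        | cons a as =>
          have hcond : (true && decide (0 < (a :: as).length) && (PySem.List.pyGet? (a :: as) (-1) == some nc)) = true := by
            simp [pyGet?_neg_one, hdup]
          simp only [hcond, if_pos rfl, ih]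
          have : pvG (a :: as).getLast? (nc :: t.filterMap (pvF no_space))
              = pvG (a :: as).getLast? (t.filterMap (pvF no_space)) := by
            simp [pvG, hdup]
          rw [this]
          simp
      · have hcond : (true && decide (0 < acc.length) && (PySem.List.pyGet? acc (-1) == some nc)) = false := by
          cases acc with
          | nil => simp
          | cons a as => simp [pyGet?_neg_one, hdup]
        simp only [hcond, Bool.false_eq_true, if_false, ih]
        have hlast : (acc ++ [nc]).getLast? = some nc := by simp
        rw [hlast]
        have : pvG acc.getLast? (nc :: t.filterMap (pvF no_space))
            = nc :: pvG (some nc) (t.filterMap (pvF no_space)) := by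
          simp [pvG]; intro h; exact (hdup h.symm).elim
        rw [this]; simp

theorem collapse_cons : ∀ (t : List Char) (a : Char), pvCollapse (a :: t) = a :: pvG (some a) t := by
  intro t
  induction t with
  | nil => intro a; rfl
  | cons b t' ih =>
    intro a
    by_cases hab : a = b
    · subst hab
      simp [pvCollapse, ih, pvG]
    · simp [pvCollapse, hab, ih, pvG]
      intro h; exact (hab h.symm).elim

theorem g_none (s : List Char) : pvG none s = pvCollapse s := by
  cases s with
  | nil => rfl
  | cons a t => simp [pvG, collapse_cons]

theorem zip_dedup : ∀ (s : List Char),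
    s.take 1 ++ (((s.zip (s.drop 1)).filter (fun p => p.1 != p.2)).map Prod.snd) = pvCollapse s := by
  intro s
  induction s with
  | nil => rfl
  | cons a t ih =>
    cases t with
    | nil => rfl
    | cons b t' =>
      have ih' : [b] ++ ((((b :: t').zip t').filter (fun p => p.1 != p.2)).map Prod.snd) = pvCollapse (b :: t') := ih
      by_cases hab : a = b
      · subst hab
        simp only [pvCollapse, if_pos rfl]
        rw [← ih']
        simp [List.zip]
      · simp only [pvCollapse, if_neg hab]
        rw [← ih']
        simp [List.zip, hab]

-- ===== VERDICT (by name: the statement is the Claim_ definition above) =====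
theorem sanitize_raw_transcript_spec : Claim_equal_sanitize_raw_transcript := by
  intro transcript no_dup no_space _
  unfold Spec_sanitize_raw_transcript sanitize_raw_transcript sanitize_raw_transcript_alt
  cases no_dup with
  | false =>
    simp only [A_false, B_filter, if_neg (by decide : ¬ (false = true)), List.nil_append]
  | true =>
    simp only [A_true, B_filter, List.nil_append, List.getLast?_nil]
    rw [zip_dedup, g_none]
    simp
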